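-- pv_equiv track=rewrite | github.com/erichaase/topcoder-python | topcoder/diet_plan.py | solution
-- ===== SOURCE A (Python) =====
-- def solution (diet, breakfast, lunch):
--     rem = set()
--     for d in diet:
--         rem.add(d)
--
--     for b in breakfast:
--         if b not in rem:
--             return "CHEATER"
--         rem.remove(b)
--
--     for l in lunch:
--         if l not in rem:
--             return "CHEATER"
--         rem.remove(l)
--
--     return "".join(sorted(list(rem)))
-- ===== SOURCE B (Python) =====
-- def solution(diet, breakfast, lunch):
--     eaten = list(breakfast) + list(lunch)
--     if len(eaten) != len(set(eaten)) or not set(eaten) <= set(diet):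
--         return "CHEATER"
--     return "".join(sorted(set(diet) - set(eaten)))
-- ===== Notes on version B (the rewrite author's own statement) =====
-- stated objective: simpler
-- what changed: Replaces the two sequential check-and-remove loops over a mutable set with set algebra: a duplicate check on the concatenated eaten list, one subset test, and a set difference joined after sorting.
import Mathlib
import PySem

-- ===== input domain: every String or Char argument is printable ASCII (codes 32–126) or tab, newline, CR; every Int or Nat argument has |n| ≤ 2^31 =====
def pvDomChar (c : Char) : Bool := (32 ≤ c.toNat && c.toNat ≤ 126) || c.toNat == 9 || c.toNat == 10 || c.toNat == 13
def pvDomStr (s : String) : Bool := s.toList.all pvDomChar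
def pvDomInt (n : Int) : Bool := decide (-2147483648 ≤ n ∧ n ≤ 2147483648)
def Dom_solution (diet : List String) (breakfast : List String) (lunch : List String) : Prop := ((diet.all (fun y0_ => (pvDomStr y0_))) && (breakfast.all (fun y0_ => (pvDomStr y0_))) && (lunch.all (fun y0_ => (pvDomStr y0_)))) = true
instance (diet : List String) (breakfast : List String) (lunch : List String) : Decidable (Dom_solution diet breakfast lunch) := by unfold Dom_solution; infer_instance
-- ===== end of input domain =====

-- B replaces A's two sequential check-and-remove loops with set algebra (duplicate check,
-- subset test, set difference); objective: simpler. Return values proved equal on all inputs.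

-- ===== PORT A =====
-- one eaten meal loop: "for x in l: if x not in rem: return CHEATER; rem.remove(x)"
def pvEat (rem : PySem.Set String) : List String → Option (PySem.Set String)
  | [] => some rem
  | x :: rest =>
    if PySem.Set.contains rem x then pvEat (PySem.Set.discard rem x) rest else none

def solution (diet : List String) (breakfast : List String) (lunch : List String) : String :=
  -- rem = set(); for d in diet: rem.add(d)  — then the two eaten loops
  match pvEat (diet.foldl PySem.Set.add PySem.Set.empty) breakfast with
  | none => "CHEATER"
  | some rem1 =>
    match pvEat rem1 lunch with
    | none => "CHEATER"
    | some rem2 => PySem.Str.join "" (PySem.List.sorted rem2 (fun x => x) false)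

-- ===== PORT B =====
def solution_alt (diet : List String) (breakfast : List String) (lunch : List String) : String :=
  -- eaten = list(breakfast) + list(lunch)
  if ((breakfast ++ lunch).length : Int) != PySem.Set.len (PySem.Set.ofList (breakfast ++ lunch))
      || !PySem.Set.issubset (PySem.Set.ofList (breakfast ++ lunch)) (PySem.Set.ofList diet) then "CHEATER"
  else PySem.Str.join "" (PySem.List.sorted (PySem.Set.diff (PySem.Set.ofList diet) (PySem.Set.ofList (breakfast ++ lunch))) (fun x => x) false)

-- ===== PRECONDITION & SPEC =====
def Spec_solution (diet : List String) (breakfast : List String) (lunch : List String) (out : String) : Prop := out = solution_alt diet breakfast lunch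
instance (diet : List String) (breakfast : List String) (lunch : List String) (out : String) : Decidable (Spec_solution diet breakfast lunch out) := by unfold Spec_solution; infer_instance

-- ===== CLAIM (what is proved, stated in full; the proofs are below) =====
def Claim_equal_solution : Prop := ∀ (diet : List String) (breakfast : List String) (lunch : List String), Dom_solution diet breakfast lunch → Spec_solution diet breakfast lunch (solution diet breakfast lunch)

-- ===== LEMMAS AND PROOFS =====

-- the eat loop succeeds exactly on duplicate-free lists contained in rem, and then
-- returns rem with the eaten elements filtered out
theorem pvEat_eq (l : List String) (s : PySem.Set String) :
    pvEat s l = if l.Nodup ∧ ∀ x ∈ l, x ∈ s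
      then some (s.filter (fun x => x ∉ l)) else none := by
  induction l generalizing s with
  | nil => simp [pvEat]
  | cons x rest ih =>
    simp only [pvEat, PySem.Set.contains_eq_listContains]
    by_cases hx : x ∈ s
    · rw [if_pos (by simpa using hx), ih]
      have hdis : PySem.Set.discard s x = s.filter (fun y => y != x) := rfl
      by_cases hc : rest.Nodup ∧ ∀ y ∈ rest, y ∈ s ∧ y ≠ x
      · rw [if_pos (by simp [hdis, List.mem_filter]; tauto),
          if_pos (by constructor
                     · exact List.nodup_cons.mpr ⟨fun hmem => (hc.2 x hmem).2 rfl, hc.1⟩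
                     · intro y hy; rcases List.mem_cons.mp hy with h | h
                       · exact h ▸ hx
                       · exact (hc.2 y h).1)]
        congr 1
        rw [hdis, List.filter_filter]
        apply List.filter_congr
        intro y _
        by_cases h1 : x = y <;> by_cases h2 : y ∈ rest <;> simp [h1, h2, bne_iff_ne, Ne.symm]
      · rw [if_neg (by simp [hdis, List.mem_filter]; push Not at hc; tauto),
          if_neg (by rintro ⟨hnd, hall⟩
                     exact hc ⟨(List.nodup_cons.mp hnd).2,
                       fun y hy => ⟨hall y (List.mem_cons_of_mem _ hy),
                         fun he => (List.nodup_cons.mp hnd).1 (he ▸ hy)⟩⟩)]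
    · rw [if_neg (by simpa using hx), if_neg (by rintro ⟨_, hall⟩; exact hx (hall x List.mem_cons_self))]

-- length of set(xs) equals length of xs exactly when xs has no duplicates
theorem length_ofList_eq_iff (xs : List String) :
    (PySem.Set.ofList xs).length = xs.length ↔ xs.Nodup := by
  induction xs with
  | nil => simp
  | cons x rest ih =>
    rw [PySem.Set.ofList_cons]
    constructor
    · intro h
      have hle : (PySem.Set.discard (PySem.Set.ofList rest) x).length ≤ (PySem.Set.ofList rest).length := by
        simpa [show PySem.Set.discard (PySem.Set.ofList rest) x = (PySem.Set.ofList rest).filter (fun y => y != x) from rfl]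
          using List.length_filter_le _ _
      have hle2 : (PySem.Set.ofList rest).length ≤ rest.length := PySem.Set.length_ofList_le rest
      simp only [List.length_cons] at h
      have heq : (PySem.Set.discard (PySem.Set.ofList rest) x).length = (PySem.Set.ofList rest).length := by omega
      have hrest : (PySem.Set.ofList rest).length = rest.length := by omega
      have hnd := ih.mp hrest
      refine List.nodup_cons.mpr ⟨fun hmem => ?_, hnd⟩
      -- if x ∈ rest then the discard strictly shrinks, contradicting heq
      have hxin : x ∈ PySem.Set.ofList rest := (PySem.Set.mem_ofList _ _).mpr hmem
      have : x ∉ PySem.Set.discard (PySem.Set.ofList rest) x := by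
        simp [PySem.Set.mem_discard]
      have hsub : (PySem.Set.discard (PySem.Set.ofList rest) x).length < (PySem.Set.ofList rest).length := by
        rw [show PySem.Set.discard (PySem.Set.ofList rest) x = (PySem.Set.ofList rest).filter (fun y => y != x) from rfl]
        apply List.length_filter_lt_length_iff_exists.mpr
        exact ⟨x, hxin, by simp⟩
      omega
    · intro hnd
      rcases List.nodup_cons.mp hnd with ⟨hx, hrest⟩
      have : PySem.Set.discard (PySem.Set.ofList rest) x = PySem.Set.ofList rest := by
        rw [show PySem.Set.discard (PySem.Set.ofList rest) x = (PySem.Set.ofList rest).filter (fun y => y != x) from rfl]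
        apply List.filter_eq_self.mpr
        intro y hy
        simp only [bne_iff_ne, ne_eq]
        exact fun he => hx (he ▸ (PySem.Set.mem_ofList _ _).mp hy)
      simp [this, ih.mpr hrest]

-- ===== VERDICT (by name: the statement is the Claim_ definition above) =====
theorem solution_spec : Claim_equal_solution := by
  intro diet breakfast lunch _
  unfold Spec_solution solution solution_alt
  have hfold : List.foldl PySem.Set.add PySem.Set.empty diet = PySem.Set.ofList diet := rfl
  rw [hfold]
  set D := PySem.Set.ofList diet with hD
  have hlen_iff : ((((breakfast ++ lunch).length : Int) != PySem.Set.len (PySem.Set.ofList (breakfast ++ lunch))) = false) ↔ (breakfast ++ lunch).Nodup := by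
    rw [show PySem.Set.len (PySem.Set.ofList (breakfast ++ lunch)) = (((PySem.Set.ofList (breakfast ++ lunch)).length : Nat) : Int) from rfl]
    rw [bne_eq_false_iff_eq]
    constructor
    · intro h; exact (length_ofList_eq_iff _).mp (by exact_mod_cast h.symm)
    · intro h; exact_mod_cast ((length_ofList_eq_iff _).mpr h).symm
  have hsub_iff : ((!PySem.Set.issubset (PySem.Set.ofList (breakfast ++ lunch)) D) = false) ↔ ∀ x ∈ breakfast ++ lunch, x ∈ D := by
    rw [Bool.not_eq_false']
    constructor
    · intro h x hx; exact (PySem.Set.issubset_iff _ _).mp h x ((PySem.Set.mem_ofList _ _).mpr hx)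
    · intro h; exact (PySem.Set.issubset_iff _ _).mpr (fun x hx => h x ((PySem.Set.mem_ofList _ _).mp hx))
  rw [pvEat_eq]
  by_cases hb : breakfast.Nodup ∧ ∀ x ∈ breakfast, x ∈ D
  · rw [if_pos hb]
    simp only []
    rw [pvEat_eq]
    by_cases hl : lunch.Nodup ∧ ∀ x ∈ lunch, x ∈ D.filter (fun x => x ∉ breakfast)
    · rw [if_pos hl]
      -- both eaten loops succeed: show B's guard is false and the joined strings agree
      have hdisj : ∀ a ∈ breakfast, a ∈ lunch → False := by
        intro a ha hal
        have h2 := hl.2 a hal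
        simp [List.mem_filter] at h2
        exact h2.2 ha
      have hnodup : (breakfast ++ lunch).Nodup :=
        List.nodup_append.mpr ⟨hb.1, hl.1, fun a ha b hbl he => hdisj a ha (he ▸ hbl)⟩
      have hsub : ∀ x ∈ breakfast ++ lunch, x ∈ D := by
        intro x hx
        rcases List.mem_append.mp hx with h | h
        · exact hb.2 x h
        · have := hl.2 x h; simp [List.mem_filter] at this; exact this.1
      rw [if_neg (by rw [Bool.or_eq_true, not_or]
                     exact ⟨by rw [Bool.not_eq_true]; exact hlen_iff.mpr hnodup,
                            by rw [Bool.not_eq_true]; exact hsub_iff.mpr hsub⟩)]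
      have hfilters : (D.filter (fun x => x ∉ breakfast)).filter (fun x => x ∉ lunch)
          = PySem.Set.diff D (PySem.Set.ofList (breakfast ++ lunch)) := by
        rw [List.filter_filter,
          show PySem.Set.diff D (PySem.Set.ofList (breakfast ++ lunch)) = D.filter (fun x => !PySem.Set.contains (PySem.Set.ofList (breakfast ++ lunch)) x) from rfl]
        apply List.filter_congr
        intro y _
        by_cases h1 : y ∈ breakfast <;> by_cases h2 : y ∈ lunch <;>
          simp [h1, h2, PySem.Set.contains_eq_listContains, PySem.Set.mem_ofList]
      rw [hfilters]
    · rw [if_neg hl]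
      -- lunch loop fails: B's guard must fire
      rw [if_pos ?_]
      rw [Bool.or_eq_true]
      by_cases hnd : (breakfast ++ lunch).Nodup
      · right
        cases hss : (!PySem.Set.issubset (PySem.Set.ofList (breakfast ++ lunch)) D) with
        | true => rfl
        | false =>
          exfalso
          apply hl
          have hsubl := hsub_iff.mp hss
          rcases List.nodup_append.mp hnd with ⟨_, hlnd, hdj⟩
          refine ⟨hlnd, fun y hy => ?_⟩
          simp only [List.mem_filter, decide_eq_true_eq]
          exact ⟨hsubl y (List.mem_append.mpr (Or.inr hy)), fun hyb => hdj y hyb y hy rfl⟩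
      · left
        cases hx : (((breakfast ++ lunch).length : Int) != PySem.Set.len (PySem.Set.ofList (breakfast ++ lunch))) with
        | true => rfl
        | false => exact absurd (hlen_iff.mp hx) hnd
  · rw [if_neg hb]
    -- breakfast loop fails: B's guard must fire
    rw [if_pos ?_]
    rw [Bool.or_eq_true]
    by_cases hnd : (breakfast ++ lunch).Nodup
    · right
      cases hss : (!PySem.Set.issubset (PySem.Set.ofList (breakfast ++ lunch)) D) with
      | true => rfl
      | false =>
        exfalso
        apply hb
        have hsubl := hsub_iff.mp hss
        exact ⟨(List.nodup_append.mp hnd).1,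
          fun y hy => hsubl y (List.mem_append.mpr (Or.inl hy))⟩
    · left
      cases hx : (((breakfast ++ lunch).length : Int) != PySem.Set.len (PySem.Set.ofList (breakfast ++ lunch))) with
      | true => rfl
      | false => exact absurd (hlen_iff.mp hx) hnd
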